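-- pv_equiv track=rewrite | github.com/dshap474/numereng | src/numereng/cli/common.py | _parse_fail_flag
-- ===== SOURCE A (Python) =====
-- from collections.abc import Sequence
--
-- def _parse_fail_flag(argv: Sequence[str]) -> tuple[bool, list[str]]:
--     fail = False
--     unknown: list[str] = []
--     for arg in argv:
--         if arg == "--fail":
--             fail = True
--         elif arg in {"-h", "--help"}:
--             continue
--         else:
--             unknown.append(arg)
--     return fail, unknown
-- ===== SOURCE B (Python) =====
-- def _parse_fail_flag(argv):
--     # Copy-then-delete: start from the full argv copy and destructively
--     # remove every recognized token, noting --fail as it is removed.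
--     unknown = list(argv)
--     fail = False
--     while "--fail" in unknown:
--         unknown.remove("--fail")
--         fail = True
--     for tok in ("-h", "--help"):
--         while tok in unknown:
--             unknown.remove(tok)
--     return fail, unknown
-- ===== Notes on version B (the rewrite author's own statement) =====
-- stated objective: alternative
-- what changed: Instead of filtering while iterating, B copies argv and destructively deletes every occurrence of the recognized tokens (--fail, -h, --help) with repeated list.remove, setting the flag as --fail tokens are removed; the remainder is the unknown list.
import Mathlib
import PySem

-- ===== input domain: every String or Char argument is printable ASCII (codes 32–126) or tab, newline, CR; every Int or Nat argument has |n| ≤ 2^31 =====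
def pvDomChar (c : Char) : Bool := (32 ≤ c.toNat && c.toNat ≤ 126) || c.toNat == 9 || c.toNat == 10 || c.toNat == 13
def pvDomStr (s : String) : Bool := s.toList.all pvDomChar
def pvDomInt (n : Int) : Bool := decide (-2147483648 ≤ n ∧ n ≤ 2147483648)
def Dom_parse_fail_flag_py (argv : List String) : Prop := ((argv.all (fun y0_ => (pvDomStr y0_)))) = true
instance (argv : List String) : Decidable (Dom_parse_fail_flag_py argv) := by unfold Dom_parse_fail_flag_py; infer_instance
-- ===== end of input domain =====

-- B replaces A's filter-while-iterating loop by copy-then-delete: it starts from a copy of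
-- argv and destructively removes every recognized token with repeated `remove`; objective: alternative.

-- ===== PORT A =====
-- literal transliteration of A's loop: fold over argv carrying (fail, unknown)
def parse_fail_flag_py (argv : List String) : Bool × List String :=
  argv.foldl
    (fun st arg =>
      if arg = "--fail" then (true, st.2)
      else if arg = "-h" ∨ arg = "--help" then st
      else (st.1, st.2 ++ [arg]))
    (false, [])

-- ===== PORT B =====
-- `while "--fail" in unknown: unknown.remove("--fail"); fail = True`
def removeFailLoop (xs : List String) (fail : Bool) : Bool × List String :=
  if "--fail" ∈ xs then removeFailLoop (xs.erase "--fail") true else (fail, xs)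
termination_by xs.length
decreasing_by
  rename_i h
  have := List.length_erase_of_mem h
  have := List.length_pos_of_mem h
  omega

-- `while tok in unknown: unknown.remove(tok)`
def removeAllLoop (tok : String) (xs : List String) : List String :=
  if tok ∈ xs then removeAllLoop tok (xs.erase tok) else xs
termination_by xs.length
decreasing_by
  rename_i h
  have := List.length_erase_of_mem h
  have := List.length_pos_of_mem h
  omega

def parse_fail_flag_py_alt (argv : List String) : Bool × List String :=
  let r := removeFailLoop argv false
  let u2 := removeAllLoop "-h" r.2
  let u3 := removeAllLoop "--help" u2
  (r.1, u3)

-- ===== PRECONDITION & SPEC =====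
def Spec_parse_fail_flag_py (argv : List String) (out : Bool × List String) : Prop := out = parse_fail_flag_py_alt argv
instance (argv : List String) (out : Bool × List String) : Decidable (Spec_parse_fail_flag_py argv out) := by unfold Spec_parse_fail_flag_py; infer_instance

-- ===== CLAIM (what is proved, stated in full; the proofs are below) =====
def Claim_equal_parse_fail_flag_py : Prop := ∀ (argv : List String), Dom_parse_fail_flag_py argv → Spec_parse_fail_flag_py argv (parse_fail_flag_py argv)

-- ===== LEMMAS AND PROOFS =====

-- erasing one occurrence of t does not change the t-free residue
theorem filter_ne_erase (t : String) (xs : List String) :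
    (xs.erase t).filter (fun a => ¬ (a = t)) = xs.filter (fun a => ¬ (a = t)) := by
  induction xs with
  | nil => simp
  | cons x xs ih =>
    by_cases hx : x = t
    · simp [hx]
    · have : (x == t) = false := by simpa using hx
      simpa [List.erase_cons, this, hx] using ih

theorem removeAllLoop_eq (tok : String) (xs : List String) :
    removeAllLoop tok xs = xs.filter (fun a => ¬ (a = tok)) := by
  induction xs using removeAllLoop.induct tok with
  | case1 xs h ih =>
    rw [removeAllLoop, if_pos h, ih, filter_ne_erase]
  | case2 xs h =>
    rw [removeAllLoop, if_neg h]
    exact (List.filter_eq_self.2 (fun a ha => by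
      simp only [decide_eq_true_eq]; rintro rfl; exact h ha)).symm

theorem removeFailLoop_eq (xs : List String) (f : Bool) :
    removeFailLoop xs f = (f || xs.contains "--fail",
      xs.filter (fun a => ¬ (a = "--fail"))) := by
  induction xs, f using removeFailLoop.induct with
  | case1 xs f h ih =>
    rw [removeFailLoop, if_pos h, ih, filter_ne_erase]
    simp [h]
  | case2 xs f h =>
    rw [removeFailLoop, if_neg h]
    simp only [Prod.mk.injEq]
    constructor
    · simp [h]
    · exact (List.filter_eq_self.2 (fun a ha => by
        simp only [decide_eq_true_eq]; rintro rfl; exact h ha)).symm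

-- characterisation of A's fold
theorem parse_fail_flag_foldl (argv : List String) (f : Bool) (u : List String) :
    argv.foldl
      (fun st arg =>
        if arg = "--fail" then (true, st.2)
        else if arg = "-h" ∨ arg = "--help" then st
        else (st.1, st.2 ++ [arg]))
      (f, u)
    = ((f || argv.contains "--fail"),
       u ++ argv.filter (fun a => ¬ (a = "--fail" ∨ a = "-h" ∨ a = "--help"))) := by
  induction argv generalizing f u with
  | nil => simp
  | cons x xs ih =>
    simp only [List.foldl_cons, List.contains_cons, List.filter_cons]
    by_cases hx : x = "--fail"
    · simp [hx, ih]
    · have hne : ("--fail" == x) = false := by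
        simp [beq_eq_false_iff_ne, Ne.symm hx]
      by_cases hh : x = "-h" ∨ x = "--help"
      · simp [hx, hh, ih, hne]
      · simp [hx, hh, ih, hne]

-- ===== VERDICT (by name: the statement is the Claim_ definition above) =====
theorem parse_fail_flag_py_spec : Claim_equal_parse_fail_flag_py := by
  intro argv _
  unfold Spec_parse_fail_flag_py parse_fail_flag_py parse_fail_flag_py_alt
  rw [parse_fail_flag_foldl]
  simp only [removeFailLoop_eq, removeAllLoop_eq, Bool.false_or, List.nil_append,
    List.filter_filter]
  congr 1
  apply List.filter_congr
  intro a _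
  by_cases h1 : a = "--fail" <;> by_cases h2 : a = "-h" <;> by_cases h3 : a = "--help" <;>
    simp [h1, h2, h3]
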